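-- pv_equiv track=rewrite | github.com/deniz-birlikci/AI-Mathematical-Olympiad | Py_Experiments.py | naive_parse
-- ===== SOURCE A (Python) =====
-- def naive_parse(answer):
--     out = []
--     start = False
--     end = False
--     for l in reversed(list(answer)):
--         if l in '0123456789' and not end:
--             start = True
--             out.append(l)
--         else:
--             if start:
--                 end = True
--
--     out = reversed(out)
--     return ''.join(out)
-- ===== SOURCE B (Python) =====
-- def naive_parse(answer):
--     cur = []
--     last = []
--     for ch in list(answer):
--         if ch in '0123456789':
--             cur.append(ch)
--         else:
--             if cur:
--                 last = cur
--                 cur = []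
--     return ''.join(cur if cur else last)
-- ===== Notes on version B (the rewrite author's own statement) =====
-- stated objective: simpler
-- what changed: Forward single pass keeping the current digit run and the last completed run, instead of A's reversed scan with start/end boolean flags.
import Mathlib
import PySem

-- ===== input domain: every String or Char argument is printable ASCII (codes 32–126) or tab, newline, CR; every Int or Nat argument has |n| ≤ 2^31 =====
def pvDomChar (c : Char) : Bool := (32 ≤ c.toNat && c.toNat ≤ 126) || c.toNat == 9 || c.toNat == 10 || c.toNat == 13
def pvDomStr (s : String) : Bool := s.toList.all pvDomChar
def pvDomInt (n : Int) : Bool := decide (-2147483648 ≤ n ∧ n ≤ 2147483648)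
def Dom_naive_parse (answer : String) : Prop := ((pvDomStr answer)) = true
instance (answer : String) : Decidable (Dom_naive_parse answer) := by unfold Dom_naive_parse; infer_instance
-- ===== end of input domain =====

-- B replaces A's reversed scan with start/end flags by a forward single pass
-- keeping the current digit run and the last completed run (objective: simpler).

-- the membership test `l in '0123456789'` on a single character
def pvDigit (c : Char) : Bool := "0123456789".toList.contains c

-- ===== PORT A =====
-- loop body of A: state (out, start, end); `out.append(l)` is `out ++ [l]`
def pvStepA (s : List Char × Bool × Bool) (l : Char) : List Char × Bool × Bool :=
  if pvDigit l && !s.2.2 then (s.1 ++ [l], true, s.2.2)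
  else (s.1, s.2.1, if s.2.1 then true else s.2.2)

def naive_parse (answer : String) : String :=
  let s := answer.toList.reverse.foldl pvStepA ([], false, false)
  String.mk s.1.reverse

-- ===== PORT B =====
-- loop body of B: state (cur, last)
def pvStepB (s : List Char × List Char) (ch : Char) : List Char × List Char :=
  if pvDigit ch then (s.1 ++ [ch], s.2)
  else if s.1 ≠ [] then ([], s.1) else s

def naive_parse_alt (answer : String) : String :=
  let s := answer.toList.foldl pvStepB ([], [])
  String.mk (if s.1 ≠ [] then s.1 else s.2)

-- ===== PRECONDITION & SPEC =====
def Spec_naive_parse (answer : String) (out : String) : Prop := out = naive_parse_alt answer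
instance (answer : String) (out : String) : Decidable (Spec_naive_parse answer out) := by unfold Spec_naive_parse; infer_instance

-- ===== CLAIM (what is proved, stated in full; the proofs are below) =====
def Claim_equal_naive_parse : Prop := ∀ (answer : String), Dom_naive_parse answer → Spec_naive_parse answer (naive_parse answer)

-- ===== LEMMAS AND PROOFS =====

-- the common value both folds compute: the last contiguous digit run
def pvSpec (l : List Char) : List Char :=
  ((l.reverse.dropWhile (fun c => !pvDigit c)).takeWhile pvDigit).reverse

-- once `end` is set, A's loop changes nothing
theorem pvA_done (r : List Char) (out : List Char) :
    r.foldl pvStepA (out, true, true) = (out, true, true) := by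
  induction r with
  | nil => rfl
  | cons c r ih =>
    simp only [List.foldl_cons, pvStepA]
    cases h : pvDigit c <;> simp [h, ih]

-- while `start` is set and `end` is not, A collects the leading digits of the rest
theorem pvA_run (r : List Char) (out : List Char) :
    (r.foldl pvStepA (out, true, false)).1 = out ++ r.takeWhile pvDigit := by
  induction r generalizing out with
  | nil => simp
  | cons c r ih =>
    simp only [List.foldl_cons, pvStepA]
    cases h : pvDigit c
    · simp [h, pvA_done]
    · simp [h, ih, List.takeWhile_cons]

-- from the initial state, A collects the first digit run of r
theorem pvA_main (r : List Char) :
    (r.foldl pvStepA ([], false, false)).1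
      = (r.dropWhile (fun c => !pvDigit c)).takeWhile pvDigit := by
  induction r with
  | nil => rfl
  | cons c r ih =>
    simp only [List.foldl_cons, pvStepA]
    cases h : pvDigit c
    · simp [h, ih, List.dropWhile_cons]
    · simp [h, pvA_run, List.dropWhile_cons, List.takeWhile_cons]

theorem pvA_eq (answer : String) :
    naive_parse answer = String.mk (pvSpec answer.toList) := by
  show String.mk ((answer.toList.reverse.foldl pvStepA ([], false, false)).1.reverse) = _
  rw [pvA_main]
  rfl

-- invariant for B's forward pass: cur is the trailing digit run of the prefix p
-- already consumed, and (cur if cur else last) is the last digit run of p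
theorem pvB_inv (l : List Char) (p cur last : List Char)
    (hcur : cur = (p.reverse.takeWhile pvDigit).reverse)
    (hres : (if cur ≠ [] then cur else last) = pvSpec p) :
    (let s := l.foldl pvStepB (cur, last)
     if s.1 ≠ [] then s.1 else s.2) = pvSpec (p ++ l) := by
  induction l generalizing p cur last with
  | nil => simpa using hres
  | cons c l ih =>
    simp only [List.foldl_cons, pvStepB]
    cases h : pvDigit c
    · simp only [h, Bool.false_eq_true, if_neg, Bool.not_eq_true]
      have hrun : ((p ++ [c]).reverse.takeWhile pvDigit).reverse = ([] : List Char) := by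
        simp [List.takeWhile_cons, h]
      have hspec : pvSpec (p ++ [c]) = pvSpec p := by
        simp [pvSpec, List.dropWhile_cons, h]
      by_cases hc : cur = []
      · subst hc
        have := ih (p ++ [c]) [] last (by simp [h]) (by simpa [hspec] using hres)
        simpa using this
      · simp only [if_pos (by simpa using hc)]
        have := ih (p ++ [c]) [] cur (by simp [h])
          (by simp [hspec]; simpa [if_pos hc, hc] using hres)
        simpa using this
    · simp only [h, Bool.true_and, if_pos]
      have hrun : ((p ++ [c]).reverse.takeWhile pvDigit).reverse
          = (p.reverse.takeWhile pvDigit).reverse ++ [c] := by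
        simp [List.takeWhile_cons, h]
      have hspec : pvSpec (p ++ [c]) = (p.reverse.takeWhile pvDigit).reverse ++ [c] := by
        simp [pvSpec, List.dropWhile_cons, h, List.takeWhile_cons]
      have := ih (p ++ [c]) (cur ++ [c]) last (by rw [hcur, hrun])
        (by simp [hspec, hcur])
      simpa using this

theorem pvB_eq (answer : String) :
    naive_parse_alt answer = String.mk (pvSpec answer.toList) := by
  have h := pvB_inv answer.toList [] [] [] (by simp) (by simp [pvSpec])
  rw [List.nil_append] at h
  exact congrArg String.mk h

-- ===== VERDICT (by name: the statement is the Claim_ definition above) =====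
theorem naive_parse_spec : Claim_equal_naive_parse := by
  intro answer _
  unfold Spec_naive_parse
  rw [pvA_eq, pvB_eq]
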